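-- pv_equiv track=rewrite | github.com/peachyCr/dev-practice | crackingTheCodingInterview/is_replaced_palindrom.py | is_replaced_palindrom
-- ===== SOURCE A (Python) =====
-- def is_replaced_palindrom(string):
--     dict_char = {}
--     for char in string:
--         if char == " ":
--             continue
--         if char in dict_char.keys():
--             dict_char[char] += 1
--         else:
--             dict_char[char] = 1
--
--     lonely_char = 1
--     for v in dict_char.values():
--         lonely_char -= v % 2
--
--     if lonely_char < 0:
--         return False
--     else:
--         return True
-- ===== SOURCE B (Python) =====
-- def is_replaced_palindrom(string):
--     odd = set()
--     for char in string:
--         if char == " ":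
--             continue
--         if char in odd:
--             odd.discard(char)
--         else:
--             odd.add(char)
--     return len(odd) <= 1
-- ===== Notes on version B (the rewrite author's own statement) =====
-- stated objective: idiomatic
-- what changed: Replaces the character-count dict plus a second pass over the counts with a single odd-parity set toggled in one pass; the final test is len(odd) <= 1.
import Mathlib
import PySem

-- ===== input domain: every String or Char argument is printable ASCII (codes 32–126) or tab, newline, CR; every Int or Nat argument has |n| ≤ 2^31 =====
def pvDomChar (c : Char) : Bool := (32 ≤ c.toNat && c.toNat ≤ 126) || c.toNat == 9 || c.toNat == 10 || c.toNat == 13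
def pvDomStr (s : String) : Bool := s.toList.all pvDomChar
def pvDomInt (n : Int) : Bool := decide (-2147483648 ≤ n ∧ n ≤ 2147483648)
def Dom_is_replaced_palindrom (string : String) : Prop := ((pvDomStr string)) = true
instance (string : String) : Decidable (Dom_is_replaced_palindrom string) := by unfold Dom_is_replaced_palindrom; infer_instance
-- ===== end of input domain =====

-- B replaces A's character-count dict and second pass over the counts by a single
-- odd-parity set toggled in one pass (idiomatic; same return value everywhere).

-- B replaces A's character-count dict and its second pass over the counts by a single
-- odd-parity set toggled in one pass (idiomatic; same return value everywhere).

-- ===== PORT A =====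
def is_replaced_palindrom (string : String) : Bool :=
  let dict_char : PySem.Dict Char Int :=
    string.toList.foldl
      (fun d char =>
        if char = ' ' then d
        else if d.contains char then d.modify char 0 (· + 1)
        else d.insert char 1)
      PySem.Dict.empty
  let lonely_char : Int :=
    dict_char.values.foldl (fun l v => l - PySem.Int.mod v 2) 1
  if lonely_char < 0 then false else true

-- ===== PORT B =====
def is_replaced_palindrom_alt (string : String) : Bool :=
  let odd : PySem.Set Char :=
    string.toList.foldl
      (fun s char =>
        if char = ' ' then s
        else if s.contains char then PySem.Set.discard s char
        else PySem.Set.add s char)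
      PySem.Set.empty
  decide (PySem.Set.len odd ≤ 1)

-- ===== PRECONDITION & SPEC =====
def Spec_is_replaced_palindrom (string : String) (out : Bool) : Prop := out = is_replaced_palindrom_alt string
instance (string : String) (out : Bool) : Decidable (Spec_is_replaced_palindrom string out) := by unfold Spec_is_replaced_palindrom; infer_instance

-- ===== CLAIM (what is proved, stated in full; the proofs are below) =====
def Claim_equal_is_replaced_palindrom : Prop := ∀ (string : String), Dom_is_replaced_palindrom string → Spec_is_replaced_palindrom string (is_replaced_palindrom string)

-- ===== LEMMAS AND PROOFS =====

-- A loop with a 'continue' on p is the same loop over the filtered list.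
theorem pv_foldl_skip {α β : Type} (f : β → α → β) (p : α → Prop) [DecidablePred p]
    (cs : List α) (init : β) :
    cs.foldl (fun acc c => if p c then acc else f acc c) init
      = (cs.filter (fun c => !decide (p c))).foldl f init := by
  induction cs generalizing init with
  | nil => rfl
  | cons c rest ih =>
      by_cases h : p c <;> simp [List.foldl_cons, h, ih]

theorem pv_stepA_eq_counter_step (d : PySem.Dict Char Int) (c : Char) :
    (if d.contains c then d.modify c 0 (· + 1) else d.insert c 1)
      = d.modify c 0 (· + 1) := by
  by_cases h : d.contains c = true
  · simp [h]
  · have h0 : d.getD c 0 = 0 :=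
      PySem.Dict.getD_of_not_contains d 0 (by simpa using h)
    simp [h, PySem.Dict.modify, h0]


theorem pv_foldl_sub_mod (vs : List Int) (x : Int) :
    vs.foldl (fun l v => l - PySem.Int.mod v 2) x
      = x - (vs.map (fun v => PySem.Int.mod v 2)).sum := by
  induction vs generalizing x with
  | nil => simp
  | cons v rest ih => rw [List.foldl_cons, ih, List.map_cons, List.sum_cons]; ring


theorem pv_toggle_spec (cs : List Char) (s : List Char) (h : s.Nodup) :
    (cs.foldl (fun s c => if s.contains c then PySem.Set.discard s c else PySem.Set.add s c) s).Nodup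
    ∧ ∀ x, (x ∈ cs.foldl (fun s c => if s.contains c then PySem.Set.discard s c else PySem.Set.add s c) s
            ↔ Odd (s.count x + cs.count x)) := by
  induction cs generalizing s with
  | nil =>
      refine ⟨h, fun x => ?_⟩
      simp only [List.foldl_nil, List.count_nil, Nat.add_zero]
      by_cases hx : x ∈ s
      · simp [hx, List.count_eq_one_of_mem h hx]
      · simp [hx, List.count_eq_zero_of_not_mem hx]
  | cons c rest ih =>
      by_cases hc : s.contains c = true
      · have hmem : c ∈ s := by simpa [PySem.Set.contains] using hc
        obtain ⟨ihn, ihm⟩ := ih (PySem.Set.discard s c) (List.Nodup.filter _ h)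
        simp only [List.foldl_cons]
        rw [if_pos hc]
        refine ⟨ihn, fun x => ?_⟩
        rw [ihm x]
        have hcount : (PySem.Set.discard s c).count x = if x = c then 0 else s.count x := by
          by_cases hx : x = c
          · subst hx
            simp [PySem.Set.discard, List.count_eq_zero, List.mem_filter]
          · simp [PySem.Set.discard, List.count_filter, hx]
        rw [hcount]
        by_cases hx : x = c
        · subst hx
          have h1 : s.count x = 1 := List.count_eq_one_of_mem h hmem
          rw [if_pos rfl, h1, List.count_cons_self, Nat.odd_iff, Nat.odd_iff]
          omega
        · rw [if_neg hx, List.count_cons_of_ne (Ne.symm hx)]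
      · have hmem : c ∉ s := by simpa [PySem.Set.contains] using hc
        have hadd : PySem.Set.add s c = s ++ [c] := by simp [PySem.Set.add, hmem]
        have hnd' : (s ++ [c]).Nodup := by
          rw [List.nodup_append]
          refine ⟨h, List.nodup_singleton c, ?_⟩
          intro a ha b hb e
          exact hmem ((e.trans (List.mem_singleton.mp hb)) ▸ ha)
        obtain ⟨ihn, ihm⟩ := ih (s ++ [c]) hnd'
        simp only [List.foldl_cons]
        rw [if_neg hc, hadd]
        refine ⟨ihn, fun x => ?_⟩
        rw [ihm x]
        by_cases hx : x = c
        · subst hx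
          rw [List.count_append, List.count_cons_self, List.count_cons_self,
            List.count_nil, Nat.odd_iff, Nat.odd_iff]
          omega
        · rw [List.count_append, List.count_cons_of_ne (Ne.symm hx),
            List.count_cons_of_ne (Ne.symm hx), List.count_nil, Nat.add_zero]

theorem pv_main (string : String) :
    is_replaced_palindrom string = is_replaced_palindrom_alt string := by
  unfold is_replaced_palindrom is_replaced_palindrom_alt
  dsimp only
  rw [pv_foldl_skip (f := fun (d : PySem.Dict Char Int) char =>
        if d.contains char then d.modify char 0 (· + 1) else d.insert char 1)
      (p := fun c => c = ' '),
      pv_foldl_skip (f := fun (s : PySem.Set Char) char =>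
        if s.contains char then PySem.Set.discard s char else PySem.Set.add s char)
      (p := fun c => c = ' ')]
  set t := string.toList.filter (fun c => !decide (c = ' ')) with ht
  have hstepA : (fun (d : PySem.Dict Char Int) (c : Char) =>
      if d.contains c then d.modify c 0 (· + 1) else d.insert c 1)
      = (fun (d : PySem.Dict Char Int) (c : Char) => d.modify c 0 (· + 1)) := by
    funext d c
    exact pv_stepA_eq_counter_step d c
  rw [hstepA]
  have hdict : t.foldl (fun (d : PySem.Dict Char Int) (c : Char) => d.modify c 0 (· + 1))
      PySem.Dict.empty = PySem.Dict.counter t := rfl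
  rw [hdict, pv_foldl_sub_mod]
  have hvals : (PySem.Dict.counter t).values
      = (PySem.Set.ofList t).map (fun k => ((t.count k : Int))) := by
    show ((PySem.Dict.counter t).items).map (·.2) = _
    rw [PySem.Dict.items_counter]
    simp [List.map_map, Function.comp]
  rw [hvals, List.map_map]
  have hmods : ((PySem.Set.ofList t).map ((fun v => PySem.Int.mod v 2) ∘ (fun k => (t.count k : Int))))
      = (PySem.Set.ofList t).map (fun k => if (decide (t.count k % 2 = 1)) = true then (1 : Int) else 0) := by
    apply List.map_congr_left
    intro k _
    show PySem.Int.mod ((t.count k : Int)) 2 = _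
    rw [PySem.Int.mod_eq_emod_of_pos (by norm_num)]
    by_cases hk : t.count k % 2 = 1 <;> simp only [hk, decide_true, decide_false] <;>
      simp <;> omega
  rw [hmods, PySem.List.sum_map_ite_one_zero]
  obtain ⟨hnd, hmem⟩ := pv_toggle_spec t PySem.Set.empty List.nodup_nil
  set os := t.foldl (fun (s : PySem.Set Char) (c : Char) =>
      if s.contains c then PySem.Set.discard s c else PySem.Set.add s c) PySem.Set.empty with hos
  set N := List.countP (fun k => decide (t.count k % 2 = 1)) (PySem.Set.ofList t) with hN
  have hlen : os.length = N := by
    have hF : N = ((PySem.Set.ofList t).filter (fun k => decide (t.count k % 2 = 1))).length := by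
      rw [hN, List.countP_eq_length_filter]
    rw [hF]
    apply List.Perm.length_eq
    apply (List.perm_ext_iff_of_nodup hnd (List.Nodup.filter _ (PySem.Set.nodup_ofList t))).mpr
    intro x
    rw [hmem x]
    simp only [List.mem_filter, PySem.Set.mem_ofList, decide_eq_true_eq]
    constructor
    · intro hodd
      have h1 : t.count x % 2 = 1 := Nat.odd_iff.mp (by simpa using hodd)
      exact ⟨List.count_pos_iff.mp (by omega), h1⟩
    · intro ⟨_, h1⟩
      simpa using Nat.odd_iff.mpr h1
  show (if (1 - (N : Int) < 0) then false else true) = decide ((os.length : Int) ≤ 1)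
  rw [hlen]
  by_cases hle : (N : Int) ≤ 1
  · rw [if_neg (by omega), decide_eq_true hle]
  · rw [if_pos (by omega), (decide_eq_false hle).symm]

-- ===== VERDICT (by name: the statement is the Claim_ definition above) =====
theorem is_replaced_palindrom_spec : Claim_equal_is_replaced_palindrom := by
  intro string _
  unfold Spec_is_replaced_palindrom
  exact pv_main string
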